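-- pv_equiv track=rewrite | github.com/ANKUR172006/HYPERLOCAL-AQI-DASHBOARD | backend/app/api/v1/routes.py | _wkt_tokenize
-- ===== SOURCE A (Python) =====
-- def _wkt_tokenize(text: str) -> list[str]:
--     tokens: list[str] = []
--     buff = ""
--     for ch in text:
--         if ch in "(),":
--             if buff.strip():
--                 tokens.append(buff.strip())
--             tokens.append(ch)
--             buff = ""
--         else:
--             buff += ch
--     if buff.strip():
--         tokens.append(buff.strip())
--     return tokens
-- ===== SOURCE B (Python) =====
-- import re
--
-- def _wkt_tokenize(text: str) -> list[str]:
--     tokens: list[str] = []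
--     for part in re.findall(r"[(),]|[^(),]+", text):
--         if part in "(),":
--             tokens.append(part)
--         else:
--             s = part.strip()
--             if s:
--                 tokens.append(s)
--     return tokens
-- ===== Notes on version B (the rewrite author's own statement) =====
-- stated objective: idiomatic
-- what changed: Replaces the per-character buffer state machine (repeated string concatenation) with a single regex findall splitting the input into delimiters and maximal non-delimiter runs, followed by a strip-and-filter post-pass.
import Mathlib
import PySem

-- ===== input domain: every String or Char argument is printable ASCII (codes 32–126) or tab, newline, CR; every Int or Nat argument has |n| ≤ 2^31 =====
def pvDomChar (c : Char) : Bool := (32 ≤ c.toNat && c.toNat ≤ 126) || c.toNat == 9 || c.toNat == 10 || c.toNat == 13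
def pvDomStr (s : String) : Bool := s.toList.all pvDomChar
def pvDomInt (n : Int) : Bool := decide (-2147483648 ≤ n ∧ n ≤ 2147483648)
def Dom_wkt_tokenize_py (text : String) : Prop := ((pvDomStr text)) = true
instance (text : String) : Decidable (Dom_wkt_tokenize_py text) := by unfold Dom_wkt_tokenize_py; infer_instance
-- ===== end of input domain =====

-- B replaces A's per-character buffer state machine by a regex-findall split into
-- delimiters and maximal non-delimiter runs followed by a strip-and-filter pass (idiomatic).

-- ===== PORT A =====
-- ch in "()," for a single character
def pvDelim (c : Char) : Bool := c == '(' || c == ')' || c == ','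

-- the for-loop of A: state = (tokens, buff); final flush after the loop
def pvLoopA : List Char → List String → List Char → List String
  | [], tokens, buff =>
    let s := PySem.Chars.strip buff
    if s ≠ [] then tokens ++ [String.ofList s] else tokens
  | c :: cs, tokens, buff =>
    if pvDelim c then
      let s := PySem.Chars.strip buff
      pvLoopA cs ((if s ≠ [] then tokens ++ [String.ofList s] else tokens) ++ [String.ofList [c]]) []
    else
      pvLoopA cs tokens (buff ++ [c])

def wkt_tokenize_py (text : String) : List String :=
  pvLoopA text.toList [] []

-- ===== PORT B =====
-- hand port of re.findall(r"[(),]|[^(),]+", text): left-to-right scan emitting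
-- single delimiter chars and maximal non-delimiter runs (exact for this pattern)
def pvFindParts : List Char → List Char → List (List Char)
  | buf, [] => if buf = [] then [] else [buf]
  | buf, c :: cs =>
    if pvDelim c then (if buf = [] then [] else [buf]) ++ [c] :: pvFindParts [] cs
    else pvFindParts (buf ++ [c]) cs

-- one loop iteration of Source B: 'part in "(),"' is Python substring membership
def pvEmit (part : List Char) : List String :=
  if PySem.Chars.isIn part ['(', ')', ','] then [String.ofList part]
  else
    let s := PySem.Chars.strip part
    if s ≠ [] then [String.ofList s] else []

def wkt_tokenize_py_alt (text : String) : List String :=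
  (pvFindParts [] text.toList).flatMap pvEmit

-- ===== PRECONDITION & SPEC =====
def Spec_wkt_tokenize_py (text : String) (out : List String) : Prop := out = wkt_tokenize_py_alt text
instance (text : String) (out : List String) : Decidable (Spec_wkt_tokenize_py text out) := by unfold Spec_wkt_tokenize_py; infer_instance

-- ===== CLAIM (what is proved, stated in full; the proofs are below) =====
def Claim_equal_wkt_tokenize_py : Prop := ∀ (text : String), Dom_wkt_tokenize_py text → Spec_wkt_tokenize_py text (wkt_tokenize_py text)

-- ===== LEMMAS AND PROOFS =====

-- a nonempty run of non-delimiter characters is not a substring of "(),"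
lemma pv_nondelim_not_isIn (buff : List Char) (hne : buff ≠ [])
    (h : buff.all (fun c => !pvDelim c) = true) :
    PySem.Chars.isIn buff ['(', ')', ','] = false := by
  rw [PySem.Chars.isIn_eq_false_iff]
  intro hinf
  obtain ⟨c, cs, rfl⟩ := List.exists_cons_of_ne_nil hne
  have hc : c ∈ ['(', ')', ','] := hinf.subset (List.mem_cons_self ..)
  have hnd := (List.all_eq_true.mp h) c (List.mem_cons_self ..)
  simp only [List.mem_cons, List.not_mem_nil, or_false] at hc
  rcases hc with rfl | rfl | rfl <;> simp [pvDelim] at hnd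

lemma pv_delim_isIn (c : Char) (h : pvDelim c = true) :
    PySem.Chars.isIn [c] ['(', ')', ','] = true := by
  rw [PySem.Chars.isIn_iff_infix]
  simp only [pvDelim, Bool.or_eq_true, beq_iff_eq] at h
  rcases h with (rfl | rfl) | rfl
  · exact ⟨[], [')', ','], rfl⟩
  · exact ⟨['('], [','], rfl⟩
  · exact ⟨['(', ')'], [], rfl⟩

-- the loop invariant: A's loop from state (tokens, buff) equals tokens ++ B's
-- post-pass over the parts of buff ++ remaining input, for a delimiter-free buff
lemma pv_loopA_eq (cs : List Char) : ∀ (toks : List String) (buff : List Char),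
    buff.all (fun c => !pvDelim c) = true →
    pvLoopA cs toks buff = toks ++ (pvFindParts buff cs).flatMap pvEmit := by
  induction cs with
  | nil =>
    intro toks buff hb
    by_cases hne : buff = []
    · subst hne; simp [pvLoopA, pvFindParts, PySem.Chars.strip, PySem.Chars.lstrip, PySem.Chars.rstrip]
    · simp only [pvLoopA, pvFindParts, if_neg hne, List.flatMap_cons, List.flatMap_nil,
        List.append_nil, pvEmit, pv_nondelim_not_isIn buff hne hb, Bool.false_eq_true, if_false]
      split <;> simp
  | cons c cs ih =>
    intro toks buff hb
    by_cases hc : pvDelim c = true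
    · simp only [pvLoopA, if_pos hc, pvFindParts]
      rw [ih _ [] (by simp)]
      by_cases hne : buff = []
      · subst hne
        simp [PySem.Chars.strip, PySem.Chars.lstrip, PySem.Chars.rstrip, pvEmit, pv_delim_isIn c hc]
      · simp only [if_neg hne, List.flatMap_append, List.flatMap_cons, List.flatMap_nil,
          List.append_nil, pvEmit, pv_nondelim_not_isIn buff hne hb, Bool.false_eq_true,
          if_false]
        split <;> simp [pv_delim_isIn c hc]
    · simp only [pvLoopA, if_neg hc, pvFindParts]
      exact ih _ _ (by simp_all)

-- ===== VERDICT (by name: the statement is the Claim_ definition above) =====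
theorem wkt_tokenize_py_spec : Claim_equal_wkt_tokenize_py := by
  intro text _
  show wkt_tokenize_py text = wkt_tokenize_py_alt text
  unfold wkt_tokenize_py wkt_tokenize_py_alt
  simpa using pv_loopA_eq text.toList [] [] (by simp)
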